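-- pv_equiv track=rewrite | github.com/pypi-data/pypi-mirror-401 | packages/in-layers-core/in_layers_core-0.4.16-py3-none-any.whl/in_layers/core/layers/features.py | _should_ignore_path
-- ===== SOURCE A (Python) =====
-- def _should_ignore_path(ignore_list: list[str], dotted: str) -> bool:
--     if not ignore_list:
--         return False
--     dotted = dotted.strip().strip(".")
--     for pattern in ignore_list:
--         if not pattern:
--             continue
--         pat = str(pattern).strip().strip(".")
--         if not pat:
--             continue
--         if dotted == pat or dotted.startswith(f"{pat}."):
--             return True
--     return False
-- ===== SOURCE B (Python) =====
-- def _should_ignore_path(ignore_list: list[str], dotted: str) -> bool: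
--     pats = {str(p).strip().strip(".") for p in ignore_list if p}
--     pats.discard("")
--     d = dotted.strip().strip(".")
--     if d in pats:
--         return True
--     return any(d[:i] in pats for i, ch in enumerate(d) if ch == ".")
-- ===== Notes on version B (the rewrite author's own statement) =====
-- stated objective: alternative
-- what changed: Instead of scanning every pattern and testing equality/startswith against the query, B builds a set of normalized patterns once and checks the query's dot-boundary prefixes for membership, so the per-query work depends on the query's depth rather than on the number of patterns.
import Mathlib
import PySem

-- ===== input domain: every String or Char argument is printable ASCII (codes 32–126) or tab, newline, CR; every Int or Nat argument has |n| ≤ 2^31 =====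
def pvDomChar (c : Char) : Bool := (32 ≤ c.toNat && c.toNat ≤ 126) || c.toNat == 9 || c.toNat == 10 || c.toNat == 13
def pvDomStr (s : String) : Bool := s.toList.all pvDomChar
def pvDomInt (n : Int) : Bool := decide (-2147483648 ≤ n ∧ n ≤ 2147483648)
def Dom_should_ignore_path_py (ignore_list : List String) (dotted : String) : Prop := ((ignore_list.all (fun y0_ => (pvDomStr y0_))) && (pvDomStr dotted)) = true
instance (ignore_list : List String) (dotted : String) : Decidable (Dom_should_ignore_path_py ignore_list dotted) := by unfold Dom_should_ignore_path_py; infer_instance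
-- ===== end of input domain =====

-- B replaces A's scan over every pattern (equality / startswith test per pattern) by one set of
-- normalized patterns plus a membership test for each dot-boundary prefix of the query (alternative
-- decomposition; the equivalence below is exact on the whole domain).

-- ===== PORT A =====
-- shared normalization helper: str(s).strip().strip(".") , taken to the char-list side
def pvNorm (s : String) : List Char :=
  (PySem.Str.stripChars (PySem.Str.strip s) ".").toList

-- the 'for pattern in ignore_list' loop of A (early return True on a match)
def pvLoopA (d : List Char) : List String → Bool
  | [] => false
  | p :: rest =>
    if p == "" then pvLoopA d rest
    else
      let pat := pvNorm p
      if pat == [] then pvLoopA d rest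
      else if d == pat || PySem.Chars.startswith d (pat ++ ['.']) then true
      else pvLoopA d rest

def should_ignore_path_py (ignore_list : List String) (dotted : String) : Bool :=
  if ignore_list == [] then false
  else pvLoopA (pvNorm dotted) ignore_list

-- ===== PORT B =====
-- pats = {str(p).strip().strip(".") for p in ignore_list if p};  pats.discard("")
def pvPats (ignore_list : List String) : PySem.Set (List Char) :=
  PySem.Set.discard
    (PySem.Set.ofList ((ignore_list.filter (fun p => !(p == ""))).map pvNorm)) []

-- d[:i] is PySem.List.slice d none (some i) (exact; i here is the nonnegative enumerate index)
def should_ignore_path_py_alt (ignore_list : List String) (dotted : String) : Bool :=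
  if PySem.Set.contains (pvPats ignore_list) (pvNorm dotted) then true
  else
    (PySem.List.enumerate (pvNorm dotted)).any
      (fun ic => ic.2 == '.' &&
        PySem.Set.contains (pvPats ignore_list) (PySem.List.slice (pvNorm dotted) none (some ic.1)))

-- ===== PRECONDITION & SPEC =====
def Spec_should_ignore_path_py (ignore_list : List String) (dotted : String) (out : Bool) : Prop := out = should_ignore_path_py_alt ignore_list dotted
instance (ignore_list : List String) (dotted : String) (out : Bool) : Decidable (Spec_should_ignore_path_py ignore_list dotted out) := by unfold Spec_should_ignore_path_py; infer_instance

-- ===== CLAIM (what is proved, stated in full; the proofs are below) =====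
def Claim_equal_should_ignore_path_py : Prop := ∀ (ignore_list : List String) (dotted : String), Dom_should_ignore_path_py ignore_list dotted → Spec_should_ignore_path_py ignore_list dotted (should_ignore_path_py ignore_list dotted)

-- ===== LEMMAS AND PROOFS =====

-- A's loop is an existential scan over the list
theorem pvLoopA_eq_any (d : List Char) (L : List String) :
    pvLoopA d L = L.any (fun p =>
      !(p == "") && (!(pvNorm p == []) &&
        (d == pvNorm p || PySem.Chars.startswith d (pvNorm p ++ ['.'])))) := by
  induction L with
  | nil => rfl
  | cons p rest ih =>
    simp only [pvLoopA, List.any_cons, ih]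
    cases h1 : (p == "") <;> cases h2 : (pvNorm p == []) <;>
      cases h3 : (d == pvNorm p || PySem.Chars.startswith d (pvNorm p ++ ['.'])) <;>
      simp

-- any over Python's enumerate
theorem pvEnumAny {α : Type} (f : Int × α → Bool) :
    ∀ (xs : List α) (s : Int),
      ((PySem.List.enumerate xs s).any f = true) ↔
        ∃ i : Nat, ∃ _ : i < xs.length, f (s + i, xs[i]) = true := by
  intro xs
  induction xs with
  | nil => intro s; simp [PySem.List.enumerate]
  | cons x t ih =>
    intro s
    simp only [PySem.List.enumerate, List.any_cons, Bool.or_eq_true, ih]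
    constructor
    · rintro (h | ⟨i, hi, hf⟩)
      · exact ⟨0, by simp, by simpa using h⟩
      · refine ⟨i + 1, by simpa using Nat.succ_lt_succ hi, ?_⟩
        have : s + 1 + (i : Int) = s + ((i : Nat) + 1 : Nat) := by push_cast; ring
        simpa [this] using hf
    · rintro ⟨i, hi, hf⟩
      cases i with
      | zero => exact Or.inl (by simpa using hf)
      | succ j =>
        refine Or.inr ⟨j, by simp only [List.length_cons] at hi; omega, ?_⟩
        have : s + 1 + (j : Int) = s + ((j : Nat) + 1 : Nat) := by push_cast; ring
        rw [this]
        simpa using hf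

-- 'd.startswith(pat + ".")' means: pat is a dot-boundary proper prefix of d
theorem pvStartswithDot (d q : List Char) :
    PySem.Chars.startswith d (q ++ ['.']) = true ↔
      ∃ i : Nat, ∃ h : i < d.length, d[i] = '.' ∧ q = d.take i := by
  unfold PySem.Chars.startswith
  rw [List.isPrefixOf_iff_prefix]
  constructor
  · rintro ⟨t, rfl⟩
    refine ⟨q.length, by simp, ?_, ?_⟩
    · rw [List.getElem_append_left (by simp)]
      simp
    · rw [List.append_assoc, List.take_left]
  · rintro ⟨i, hi, hdot, rfl⟩
    have h : (d.take i) ++ ['.'] = d.take (i + 1) := by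
      rw [List.take_add_one]
      simp [List.getElem?_eq_getElem hi, hdot]
    rw [h]
    exact List.take_prefix _ _

-- membership in B's pattern set
set_option maxHeartbeats 1000000 in
theorem pvMemPats (L : List String) (x : List Char) :
    x ∈ pvPats L ↔ (¬ x = [] ∧ ∃ p ∈ L, ¬ p = "" ∧ pvNorm p = x) := by
  unfold pvPats
  rw [PySem.Set.mem_discard, PySem.Set.mem_ofList]
  constructor
  · rintro ⟨hmem, hne⟩
    rcases List.mem_map.mp hmem with ⟨p, hpf, rfl⟩
    rcases List.mem_filter.mp hpf with ⟨hpL, hpne⟩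
    refine ⟨hne, p, hpL, ?_, rfl⟩
    simpa using hpne
  · rintro ⟨hne, p, hpL, hpne, rfl⟩
    exact ⟨List.mem_map.mpr ⟨p, List.mem_filter.mpr ⟨hpL, by simpa using hpne⟩, rfl⟩, hne⟩

-- the common characterization of both programs
theorem pvA_iff (L : List String) (dotted : String) :
    should_ignore_path_py L dotted = true ↔
      ∃ p ∈ L, ¬ p = "" ∧ ¬ pvNorm p = [] ∧
        (pvNorm dotted = pvNorm p ∨
          ∃ i : Nat, ∃ h : i < (pvNorm dotted).length,
            (pvNorm dotted)[i] = '.' ∧ pvNorm p = (pvNorm dotted).take i) := by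
  unfold should_ignore_path_py
  cases L with
  | nil => simp
  | cons a t =>
    rw [if_neg (by simp), pvLoopA_eq_any]
    simp only [List.any_eq_true, Bool.and_eq_true, Bool.or_eq_true, beq_iff_eq,
      Bool.not_eq_eq_eq_not, Bool.not_true, beq_eq_false_iff_ne, ne_eq, pvStartswithDot]

set_option maxHeartbeats 1000000 in
theorem pvB_iff (L : List String) (dotted : String) :
    should_ignore_path_py_alt L dotted = true ↔
      ∃ p ∈ L, ¬ p = "" ∧ ¬ pvNorm p = [] ∧
        (pvNorm dotted = pvNorm p ∨
          ∃ i : Nat, ∃ h : i < (pvNorm dotted).length,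
            (pvNorm dotted)[i] = '.' ∧ pvNorm p = (pvNorm dotted).take i) := by
  have hif : ∀ (c b : Bool), (if c then true else b) = (c || b) := by
    intro c b; cases c <;> simp
  unfold should_ignore_path_py_alt
  rw [hif, Bool.or_eq_true,
    pvEnumAny (fun ic => ic.2 == '.' &&
      PySem.Set.contains (pvPats L) (PySem.List.slice (pvNorm dotted) none (some ic.1)))]
  have hslice : ∀ i : Nat,
      PySem.List.slice (pvNorm dotted) none (some ((0 : Int) + i)) = (pvNorm dotted).take i := by
    intro i
    rw [zero_add, PySem.List.slice_to _ (Int.natCast_nonneg i)]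
    simp
  constructor
  · rintro (hc | ⟨i, hi, hf⟩)
    · obtain ⟨hne, p, hp, hpne, hnorm⟩ := (pvMemPats _ _).mp ((PySem.Set.contains_iff _ _).mp hc)
      exact ⟨p, hp, hpne, by rw [hnorm]; exact hne, Or.inl hnorm.symm⟩
    · simp only [Bool.and_eq_true, beq_iff_eq, hslice i] at hf
      obtain ⟨hdot, hmem⟩ := hf
      obtain ⟨hne, p, hp, hpne, hnorm⟩ := (pvMemPats _ _).mp ((PySem.Set.contains_iff _ _).mp hmem)
      exact ⟨p, hp, hpne, by rw [hnorm]; exact hne, Or.inr ⟨i, hi, hdot, hnorm⟩⟩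
  · rintro ⟨p, hp, hpne, hnne, (heq | ⟨i, hi, hdot, htake⟩)⟩
    · exact Or.inl ((PySem.Set.contains_iff _ _).mpr ((pvMemPats _ _).mpr
        ⟨by rw [heq]; exact hnne, p, hp, hpne, heq.symm⟩))
    · refine Or.inr ⟨i, hi, ?_⟩
      simp only [Bool.and_eq_true, beq_iff_eq, hslice i]
      exact ⟨hdot, (PySem.Set.contains_iff _ _).mpr ((pvMemPats _ _).mpr
        ⟨by rw [← htake]; exact hnne, p, hp, hpne, htake⟩)⟩

-- ===== VERDICT (by name: the statement is the Claim_ definition above) =====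
theorem should_ignore_path_py_spec : Claim_equal_should_ignore_path_py := by
  unfold Claim_equal_should_ignore_path_py
  intro L dotted _
  unfold Spec_should_ignore_path_py
  rw [Bool.eq_iff_iff, pvA_iff, pvB_iff]
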